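-- pv_equiv track=rewrite | github.com/systemetric/kokimarker | kokirender/marker.py | code_to_lists
-- ===== SOURCE A (Python) =====
-- def code_to_lists(code):
--
--     output = []
--
--     for i in range(5):
--         l = []
--
--         for j in range(4):
--             mask = 0x1 << (i*4+j)
--             tmp = code & mask
--             bit = 1
--             if (tmp == 0):
--                 bit = 0
--
--             l.append(bit)
--
--         output.append(l)
--
--     return output
-- ===== SOURCE B (Python) =====
-- def code_to_lists(code):
--     bits = [(code >> k) & 1 for k in range(20)]
--     return [bits[r * 4:r * 4 + 4] for r in range(5)]
-- ===== Notes on version B (the rewrite author's own statement) =====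
-- stated objective: simpler
-- what changed: B extracts all the bits in one flat shift-and-mask pass and then reshapes the flat list into rows by slicing, instead of A's nested loops building each bit with a mask/compare/branch.
import Mathlib
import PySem

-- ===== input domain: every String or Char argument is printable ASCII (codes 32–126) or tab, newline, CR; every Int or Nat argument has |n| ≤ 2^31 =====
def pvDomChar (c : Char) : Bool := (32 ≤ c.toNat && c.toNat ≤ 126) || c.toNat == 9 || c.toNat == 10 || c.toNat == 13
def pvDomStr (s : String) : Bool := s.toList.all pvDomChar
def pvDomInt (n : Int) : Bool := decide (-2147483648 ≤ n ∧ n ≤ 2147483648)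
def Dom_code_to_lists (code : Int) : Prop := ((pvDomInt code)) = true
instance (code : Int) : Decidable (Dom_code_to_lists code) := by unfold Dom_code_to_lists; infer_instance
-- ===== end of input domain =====

-- B extracts all the bits in one flat shift-and-mask pass and reshapes them into rows by slicing,
-- instead of A's nested loops building each bit with a mask/compare/branch; same output, flatter decomposition.

-- ===== PORT A =====
def code_to_lists (code : Int) : List (List Int) :=
  (PySem.List.pyRange 0 5 1).foldl (fun output i =>
    output ++ [(PySem.List.pyRange 0 4 1).foldl (fun l j =>
      let mask : Int := (1 : Int) <<< (i * 4 + j).toNat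
      let tmp := PySem.Int.band code mask
      let bit : Int := if tmp = 0 then 0 else 1
      l ++ [bit]) []]) []

-- ===== PORT B =====
def code_to_lists_alt (code : Int) : List (List Int) :=
  let bits := (PySem.List.pyRange 0 20 1).map (fun k => PySem.Int.band (code >>> Int.toNat k) 1)
  (PySem.List.pyRange 0 5 1).map (fun r => PySem.List.slice bits (some (r * 4)) (some (r * 4 + 4)))

-- ===== PRECONDITION & SPEC =====
def Spec_code_to_lists (code : Int) (out : List (List Int)) : Prop := out = code_to_lists_alt code
instance (code : Int) (out : List (List Int)) : Decidable (Spec_code_to_lists code out) := by unfold Spec_code_to_lists; infer_instance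

-- ===== CLAIM (what is proved, stated in full; the proofs are below) =====
def Claim_equal_code_to_lists : Prop := ∀ (code : Int), Dom_code_to_lists code → Spec_code_to_lists code (code_to_lists code)

-- ===== LEMMAS AND PROOFS =====

-- A's bit (i*4+j): mask-and-compare.  B's bit k: shift-and-mask.
def pvBitA (code : Int) (k : Nat) : Int := if PySem.Int.band code ((1:Int) <<< k) = 0 then 0 else 1
def pvBitB (code : Int) (k : Int) : Int := PySem.Int.band (code >>> Int.toNat k) 1

-- the heart: Python's (a >> k) & 1 equals 'if a & (1 << k) == 0 then 0 else 1' for every Int a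
theorem pvBitLemma (a : Int) (k : Nat) :
    PySem.Int.band (a >>> k) 1 = if PySem.Int.band a ((1:Int) <<< k) = 0 then 0 else 1 := by
  rcases a with m | m
  · have h1 : (Int.ofNat m) >>> k = Int.ofNat (m >>> k) := rfl
    have h2 : ((1:Int) <<< k) = Int.ofNat (1 <<< k) := rfl
    rw [h1, h2]
    simp only [PySem.Int.band, Int.ofNat_eq_natCast, Int.natCast_nonneg, if_true, Int.toNat_natCast]
    rw [if_pos (by norm_num : (0:Int) ≤ 1), Int.toNat_one]
    have ht : m >>> k &&& 1 = (m.testBit k).toNat := by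
      simp [Nat.testBit, Nat.and_one_is_mod, Nat.shiftRight_eq_div_pow]
      cases Nat.mod_two_eq_zero_or_one (m / 2 ^ k) with
      | inl h => simp [h]
      | inr h => simp [h]
    have ha : m &&& 1 <<< k = (m.testBit k).toNat * 2 ^ k := by
      rw [Nat.shiftLeft_eq, one_mul, Nat.and_two_pow]
    rw [ht, ha]
    cases hb : m.testBit k <;> simp
  · have h1 : (Int.negSucc m) >>> k = Int.negSucc (m >>> k) := rfl
    have h2 : ((1:Int) <<< k) = Int.ofNat (1 <<< k) := rfl
    rw [h1, h2]
    have hns : ∀ x : Nat, ¬ ((0:Int) ≤ Int.negSucc x) := by intro x; simp [Int.negSucc_eq]; omega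
    have hneg : ∀ x : Nat, (-(Int.negSucc x) - 1).toNat = x := by
      intro x; simp [Int.negSucc_eq]
    simp only [PySem.Int.band, Int.ofNat_eq_natCast, Int.natCast_nonneg, if_true,
      Int.toNat_natCast, hns, if_false, hneg]
    rw [if_pos (by norm_num : (0:Int) ≤ 1), Int.toNat_one]
    have ht : m >>> k &&& 1 = (m.testBit k).toNat := by
      simp [Nat.testBit, Nat.and_one_is_mod, Nat.shiftRight_eq_div_pow]
      cases Nat.mod_two_eq_zero_or_one (m / 2 ^ k) with
      | inl h => simp [h]
      | inr h => simp [h]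
    have ha : 1 <<< k &&& m = (m.testBit k).toNat * 2 ^ k := by
      rw [Nat.and_comm, Nat.shiftLeft_eq, one_mul, Nat.and_two_pow]
    rw [Nat.and_comm 1, ht, ha]
    have hle : 1 <<< k = 2 ^ k := by rw [Nat.shiftLeft_eq, one_mul]
    rw [hle]
    cases hb : m.testBit k <;> simp

theorem pvBB (c k : Int) : pvBitB c k = pvBitA c k.toNat := by
  unfold pvBitB pvBitA
  exact pvBitLemma c k.toNat

-- both ports, written out entry by entry (definitional for each side)
theorem pvAeq (code : Int) : code_to_lists code =
    [[pvBitA code 0, pvBitA code 1, pvBitA code 2, pvBitA code 3],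
     [pvBitA code 4, pvBitA code 5, pvBitA code 6, pvBitA code 7],
     [pvBitA code 8, pvBitA code 9, pvBitA code 10, pvBitA code 11],
     [pvBitA code 12, pvBitA code 13, pvBitA code 14, pvBitA code 15],
     [pvBitA code 16, pvBitA code 17, pvBitA code 18, pvBitA code 19]] := rfl

theorem pvBeq (code : Int) : code_to_lists_alt code =
    [[pvBitB code 0, pvBitB code 1, pvBitB code 2, pvBitB code 3],
     [pvBitB code 4, pvBitB code 5, pvBitB code 6, pvBitB code 7],
     [pvBitB code 8, pvBitB code 9, pvBitB code 10, pvBitB code 11],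
     [pvBitB code 12, pvBitB code 13, pvBitB code 14, pvBitB code 15],
     [pvBitB code 16, pvBitB code 17, pvBitB code 18, pvBitB code 19]] := by rfl

-- ===== VERDICT (by name: the statement is the Claim_ definition above) =====
theorem code_to_lists_spec : Claim_equal_code_to_lists := by
  intro code _
  unfold Spec_code_to_lists
  rw [pvAeq, pvBeq]
  simp only [pvBB]
  rfl
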